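-- pv_equiv track=rewrite | github.com/dhc8/advent-of-code-2017 | 9.py | remove_cancels
-- ===== SOURCE A (Python) =====
-- def remove_cancels(stream):
--     remove_next = False
--     for char in stream:
--         if remove_next:
--             remove_next = False
--             continue
--         elif char == '!':
--             remove_next = True
--             continue
--         else:
--             yield char
-- ===== SOURCE B (Python) =====
-- def remove_cancels(stream):
--     # Stage 1: split the stream into the segments between '!' marks.
--     parts = []
--     cur = []
--     for char in stream:
--         if char == '!':
--             parts.append(cur)
--             cur = []
--         else:
--             cur.append(char)
--     parts.append(cur)
--     # Stage 2: the first segment is kept whole; after a '!', a nonempty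
--     # segment loses its first character, while an empty segment means the
--     # '!' cancelled the next '!', so the segment after it is kept whole.
--     for ch in parts[0]:
--         yield ch
--     i = 1
--     while i < len(parts):
--         if parts[i]:
--             for ch in parts[i][1:]:
--                 yield ch
--             i += 1
--         else:
--             if i + 1 < len(parts):
--                 for ch in parts[i + 1]:
--                     yield ch
--             i += 2
-- ===== Notes on version B (the rewrite author's own statement) =====
-- stated objective: alternative
-- what changed: B works in two staged passes: it first splits the stream into the segments between '!' marks, then reassembles the output segment-wise (first segment kept whole, a nonempty segment after a '!' loses its first character, an empty segment pairs the '!' with the next '!' so the following segment is kept whole), instead of A's single character loop carrying a remove_next flag.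
import Mathlib
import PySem

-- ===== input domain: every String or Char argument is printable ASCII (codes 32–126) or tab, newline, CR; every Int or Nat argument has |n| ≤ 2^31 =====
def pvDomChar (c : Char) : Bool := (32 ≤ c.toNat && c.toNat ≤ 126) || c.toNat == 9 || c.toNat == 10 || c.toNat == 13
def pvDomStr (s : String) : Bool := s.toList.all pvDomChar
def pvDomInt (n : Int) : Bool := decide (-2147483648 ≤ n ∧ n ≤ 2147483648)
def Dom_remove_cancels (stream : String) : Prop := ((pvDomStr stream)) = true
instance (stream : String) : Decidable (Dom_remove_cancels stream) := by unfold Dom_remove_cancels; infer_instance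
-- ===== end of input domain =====

-- B replaces A's flag-carrying character loop by two staged passes (split on '!' into segments, then merge the segments); objective: alternative.

-- ===== PORT A =====
-- single pass: the remove_next flag is threaded through the recursion
def remove_cancels_go (remove_next : Bool) : List Char → List String
  | [] => []
  | c :: rest =>
    if remove_next then remove_cancels_go false rest
    else if c = '!' then remove_cancels_go true rest
    else String.mk [c] :: remove_cancels_go false rest

def remove_cancels (stream : String) : List String :=
  remove_cancels_go false stream.toList

-- ===== PORT B =====
-- stage 1 of Source B: the loop body building (parts, cur)
def rcSplitStep (st : List (List Char) × List Char) (c : Char) : List (List Char) × List Char :=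
  if c = '!' then (st.1 ++ [st.2], []) else (st.1, st.2 ++ [c])

-- stage 2 of Source B: the while loop from i = 1, consuming one or two segments per step
def rcMerge : List (List Char) → List String
  | [] => []
  | p :: rest =>
    if p ≠ [] then (p.drop 1).map (fun c => String.mk [c]) ++ rcMerge rest
    else
      match rest with
      | [] => []
      | q :: rest' => q.map (fun c => String.mk [c]) ++ rcMerge rest'

def remove_cancels_alt (stream : String) : List String :=
  let st := stream.toList.foldl rcSplitStep ([], [])
  let parts := st.1 ++ [st.2]
  match parts with
  | [] => []   -- unreachable: parts is never empty
  | p0 :: rest => p0.map (fun c => String.mk [c]) ++ rcMerge rest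

-- ===== PRECONDITION & SPEC =====
def Spec_remove_cancels (stream : String) (out : List String) : Prop := out = remove_cancels_alt stream
instance (stream : String) (out : List String) : Decidable (Spec_remove_cancels stream out) := by unfold Spec_remove_cancels; infer_instance

-- ===== CLAIM (what is proved, stated in full; the proofs are below) =====
def Claim_equal_remove_cancels : Prop := ∀ (stream : String), Dom_remove_cancels stream → Spec_remove_cancels stream (remove_cancels stream)

-- ===== LEMMAS AND PROOFS =====
-- recursive characterisation of stage 1 (cur is the open segment)
def rcSplitRec (cur : List Char) : List Char → List (List Char)
  | [] => [cur]
  | c :: cs => if c = '!' then cur :: rcSplitRec [] cs else rcSplitRec (cur ++ [c]) cs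

theorem rcSplitRec_ne_nil : ∀ (l : List Char) (cur : List Char), rcSplitRec cur l ≠ []
  | [], cur => by simp [rcSplitRec]
  | c :: cs, cur => by
    by_cases h : c = '!' <;> simp [rcSplitRec, h]
    exact rcSplitRec_ne_nil cs (cur ++ [c])

theorem rcFoldl_eq_splitRec : ∀ (l : List Char) (acc : List (List Char)) (cur : List Char),
    (l.foldl rcSplitStep (acc, cur)).1 ++ [(l.foldl rcSplitStep (acc, cur)).2] = acc ++ rcSplitRec cur l
  | [], acc, cur => by simp [rcSplitRec]
  | c :: cs, acc, cur => by
    by_cases h : c = '!'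
    · simp [List.foldl, rcSplitStep, rcSplitRec, h, rcFoldl_eq_splitRec cs (acc ++ [cur]) []]
    · simp [List.foldl, rcSplitStep, rcSplitRec, h, rcFoldl_eq_splitRec cs acc (cur ++ [c])]

-- the output of stage 2 applied to a whole segment list (first segment kept whole)
def rcTop (parts : List (List Char)) : List String :=
  match parts with
  | [] => []
  | p0 :: rest => p0.map (fun c => String.mk [c]) ++ rcMerge rest

-- main invariant, three statements proved together by strong induction on the length:
--  (1) rcTop (split with open segment cur) = cur (whole) ++ A's output with flag off
--  (2) rcMerge (split with empty open segment) = A's output with flag on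
--  (3) rcMerge (split with nonempty open segment cur) = cur minus its head ++ A's output with flag off
theorem rc_main : ∀ (l : List Char),
    (∀ cur, rcTop (rcSplitRec cur l) = cur.map (fun c => String.mk [c]) ++ remove_cancels_go false l)
    ∧ (rcMerge (rcSplitRec [] l) = remove_cancels_go true l)
    ∧ (∀ cur, cur ≠ [] → rcMerge (rcSplitRec cur l) =
        (cur.drop 1).map (fun c => String.mk [c]) ++ remove_cancels_go false l) := by
  intro l
  induction l with
  | nil =>
    refine ⟨fun cur => by simp [rcSplitRec, rcTop, remove_cancels_go, rcMerge], by simp [rcSplitRec, rcMerge, remove_cancels_go], fun cur h => ?_⟩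
    simp [rcSplitRec, rcMerge, h, remove_cancels_go]
  | cons c cs ih =>
    obtain ⟨ihA, ihB, ihC⟩ := ih
    by_cases h : c = '!'
    · subst h
      refine ⟨fun cur => ?_, ?_, fun cur hcur => ?_⟩
      · simp [rcSplitRec, rcTop, remove_cancels_go, ihB]
      · -- rcMerge ([] :: rcSplitRec [] cs) = rcTop (rcSplitRec [] cs) = go false cs
        obtain ⟨q, rest', hq⟩ := List.exists_cons_of_ne_nil (rcSplitRec_ne_nil cs [])
        have : rcMerge ([] :: rcSplitRec [] cs) = rcTop (rcSplitRec [] cs) := by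
          rw [hq]; simp [rcMerge, rcTop]
        simp [rcSplitRec, remove_cancels_go, this, ihA]
      · cases cur with
        | nil => exact absurd rfl hcur
        | cons a as =>
          rw [rcSplitRec.eq_def]
          simp only [if_pos rfl]
          rw [rcMerge.eq_def]
          simp [remove_cancels_go, ihB]
    · refine ⟨fun cur => ?_, ?_, fun cur hcur => ?_⟩
      · simp [rcSplitRec, h, remove_cancels_go, ihA (cur ++ [c])]
      · have := ihC [c] (by simp)
        simp [rcSplitRec, h, remove_cancels_go, this]
      · have := ihC (cur ++ [c]) (by simp)
        have hdrop : (cur ++ [c]).drop 1 = cur.drop 1 ++ [c] := by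
          cases cur with
          | nil => exact absurd rfl hcur
          | cons a as => simp
        simp [rcSplitRec, h, remove_cancels_go, this, hdrop]

-- ===== VERDICT (by name: the statement is the Claim_ definition above) =====
theorem remove_cancels_spec : Claim_equal_remove_cancels := by
  intro s _
  unfold Spec_remove_cancels remove_cancels remove_cancels_alt
  have hsplit := rcFoldl_eq_splitRec s.toList [] []
  simp only [List.nil_append] at hsplit
  have hmain := (rc_main s.toList).1 []
  simp only [List.map_nil, List.nil_append] at hmain
  obtain ⟨p0, rest, hq⟩ := List.exists_cons_of_ne_nil (rcSplitRec_ne_nil s.toList [])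
  rw [← hmain, hq]
  simp [rcTop, hsplit, hq]
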